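-- pv_equiv track=rewrite | github.com/fiveages-sim/lerobot_ros2 | examples/IsaacSim_DobotCR5/scripts/convert_raw_to_lerobot.py | _replace_quat_names
-- ===== SOURCE A (Python) =====
-- ROT6D_PREFIX = "end_effector.rot6d"
--
-- QUAT_NAMES = [
--     "end_effector.orientation.x",
--     "end_effector.orientation.y",
--     "end_effector.orientation.z",
--     "end_effector.orientation.w",
-- ]
--
-- def _replace_quat_names(names: list[str]) -> tuple[list[str], bool]:
--     if not all(name in names for name in QUAT_NAMES):
--         return names, False
--     start_idx = min(names.index(n) for n in QUAT_NAMES)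
--     new_names = [n for n in names if n not in QUAT_NAMES]
--     rot6d_names = [f"{ROT6D_PREFIX}_{i}" for i in range(6)]
--     for offset, name in enumerate(rot6d_names):
--         new_names.insert(start_idx + offset, name)
--     return new_names, True
-- ===== SOURCE B (Python) =====
-- ROT6D_PREFIX = "end_effector.rot6d"
--
-- QUAT_NAMES = [
--     "end_effector.orientation.x",
--     "end_effector.orientation.y",
--     "end_effector.orientation.z",
--     "end_effector.orientation.w",
-- ]
--
-- def _replace_quat_names(names: list[str]) -> tuple[list[str], bool]:
--     if not all(name in names for name in QUAT_NAMES):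
--         return names, False
--     new_names = []
--     emitted = False
--     for name in names:
--         if name in QUAT_NAMES:
--             if not emitted:
--                 new_names.extend(f"{ROT6D_PREFIX}_{i}" for i in range(6))
--                 emitted = True
--         else:
--             new_names.append(name)
--     return new_names, True
-- ===== Notes on version B (the rewrite author's own statement) =====
-- stated objective: simpler
-- what changed: A computes the minimum quat index, filters, and then performs six positional inserts; B builds the result in a single weaving pass that appends non-quat names and emits the six rot6d names once, at the first quat name.
import Mathlib
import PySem

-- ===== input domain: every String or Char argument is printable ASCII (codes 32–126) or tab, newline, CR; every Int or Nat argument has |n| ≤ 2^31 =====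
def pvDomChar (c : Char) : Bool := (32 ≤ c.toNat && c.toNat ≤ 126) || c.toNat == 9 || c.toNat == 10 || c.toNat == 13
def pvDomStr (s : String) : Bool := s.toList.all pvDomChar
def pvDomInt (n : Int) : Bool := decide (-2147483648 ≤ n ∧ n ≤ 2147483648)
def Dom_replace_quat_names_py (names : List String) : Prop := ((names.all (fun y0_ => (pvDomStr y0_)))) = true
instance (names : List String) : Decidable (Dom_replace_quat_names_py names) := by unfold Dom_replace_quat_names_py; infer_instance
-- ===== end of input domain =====

-- B replaces A's min-index / filter / six-point-insert sequence with a single weaving pass (simpler decomposition, same cost).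
-- In the no-quat branch Python A returns the `names` object itself while B also returns it; equality here is about values.

-- ===== PORT A =====
-- module constants shared by both Pythons
def pvQuatNames : List String :=
  ["end_effector.orientation.x", "end_effector.orientation.y",
   "end_effector.orientation.z", "end_effector.orientation.w"]

def replace_quat_names_py (names : List String) : List String × Bool :=
  if !(pvQuatNames.all (fun name => names.contains name)) then
    (names, false)
  else
    -- min(names.index(n) for n in QUAT_NAMES); under the guard index? is always some, getD 0 is unreachable
    let start_idx : Int :=
      ((PySem.List.min? (pvQuatNames.map (fun n => ((PySem.List.index? names n).getD 0 : Int))) (fun x => x)).getD 0)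
    let new_names := names.filter (fun n => !(pvQuatNames.contains n))
    let rot6d_names := (PySem.List.pyRange 0 6 1).map (fun i => "end_effector.rot6d" ++ "_" ++ PySem.Int.toStr i)
    let new_names := (PySem.List.enumerate rot6d_names).foldl
      (fun acc p => PySem.List.insert acc (start_idx + p.1) p.2) new_names
    (new_names, true)

-- ===== PORT B =====
def replace_quat_names_py_alt (names : List String) : List String × Bool :=
  if !(pvQuatNames.all (fun name => names.contains name)) then
    (names, false)
  else
    let rot6d_names := (PySem.List.pyRange 0 6 1).map (fun i => "end_effector.rot6d" ++ "_" ++ PySem.Int.toStr i)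
    let r := names.foldl
      (fun (st : List String × Bool) name =>
        if pvQuatNames.contains name then
          if !st.2 then (st.1 ++ rot6d_names, true) else st
        else (st.1 ++ [name], st.2))
      ([], false)
    (r.1, true)

-- ===== PRECONDITION & SPEC =====
def Spec_replace_quat_names_py (names : List String) (out : List String × Bool) : Prop := out = replace_quat_names_py_alt names
instance (names : List String) (out : List String × Bool) : Decidable (Spec_replace_quat_names_py names out) := by unfold Spec_replace_quat_names_py; infer_instance

-- ===== CLAIM (what is proved, stated in full; the proofs are below) =====
def Claim_equal_replace_quat_names_py : Prop := ∀ (names : List String), Dom_replace_quat_names_py names → Spec_replace_quat_names_py names (replace_quat_names_py names)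

-- ===== LEMMAS AND PROOFS =====

-- any list with a quat element splits as non-quat prefix ++ first quat ++ rest
theorem pv_exists_split (names : List String)
    (h : ∃ n ∈ names, pvQuatNames.contains n = true) :
    ∃ pre q suf, names = pre ++ q :: suf ∧ pvQuatNames.contains q = true ∧
      ∀ n ∈ pre, pvQuatNames.contains n = false := by
  induction names with
  | nil => rcases h with ⟨n, hn, _⟩; cases hn
  | cons a l ih =>
    by_cases ha : pvQuatNames.contains a = true
    · exact ⟨[], a, l, rfl, ha, by simp⟩
    · rcases h with ⟨n, hn, hq⟩
      rcases List.mem_cons.mp hn with rfl | hn'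
      · exact absurd hq ha
      · rcases ih ⟨n, hn', hq⟩ with ⟨pre, q, suf, rfl, hq', hpre⟩
        refine ⟨a :: pre, q, suf, rfl, hq', ?_⟩
        intro n hn
        rcases List.mem_cons.mp hn with rfl | hn''
        · simpa using ha
        · exact hpre n hn''

-- the sequential-insert loop of A splices the block in at position pre.length
theorem pv_ins_block (s : Nat) (ys : List String) :
    ∀ (pre rest : List String) (t : Nat), pre.length = s + t →
      (PySem.List.enumerate ys (t : Int)).foldl
          (fun acc p => PySem.List.insert acc ((s : Int) + p.1) p.2) (pre ++ rest)
        = pre ++ ys ++ rest := by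
  induction ys with
  | nil => intro pre rest t _; simp [PySem.List.enumerate_nil]
  | cons y ys ih =>
    intro pre rest t hlen
    rw [PySem.List.enumerate_cons]
    have hcast : (s : Int) + (t : Int) = ((pre.length : Nat) : Int) := by
      rw [hlen]; push_cast; ring
    simp only [List.foldl_cons, hcast,
      PySem.List.insert_natCast (pre ++ rest) pre.length y
        (by simp)]
    have htake : (pre ++ rest).take pre.length = pre := by simp
    have hdrop : (pre ++ rest).drop pre.length = rest := by simp
    rw [htake, hdrop]
    have : (t : Int) + 1 = ((t + 1 : Nat) : Int) := by push_cast; ring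
    rw [this]
    have := ih (pre ++ [y]) rest (t + 1) (by simp [hlen]; omega)
    simpa using this

-- B's weaving fold over an all-non-quat list just appends it
theorem pv_fold_nonquat (l : List String) :
    ∀ (acc : List String) (b : Bool), (∀ n ∈ l, pvQuatNames.contains n = false) →
      l.foldl (fun (st : List String × Bool) name =>
          if pvQuatNames.contains name then
            if !st.2 then (st.1 ++ (PySem.List.pyRange 0 6 1).map (fun i => "end_effector.rot6d" ++ "_" ++ PySem.Int.toStr i), true) else st
          else (st.1 ++ [name], st.2)) (acc, b)
        = (acc ++ l, b) := by
  induction l with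
  | nil => intro acc b _; simp
  | cons a l ih =>
    intro acc b h
    have ha := h a (List.mem_cons_self)
    simp only [List.foldl_cons, ha, Bool.false_eq_true, if_false]
    rw [ih (acc ++ [a]) b (fun n hn => h n (List.mem_cons_of_mem _ hn))]
    simp

-- B's weaving fold with the flag already set filters out the quat names
theorem pv_fold_done (l : List String) :
    ∀ (acc : List String),
      l.foldl (fun (st : List String × Bool) name =>
          if pvQuatNames.contains name then
            if !st.2 then (st.1 ++ (PySem.List.pyRange 0 6 1).map (fun i => "end_effector.rot6d" ++ "_" ++ PySem.Int.toStr i), true) else st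
          else (st.1 ++ [name], st.2)) (acc, true)
        = (acc ++ l.filter (fun n => !(pvQuatNames.contains n)), true) := by
  induction l with
  | nil => intro acc; simp
  | cons a l ih =>
    intro acc
    by_cases ha : pvQuatNames.contains a = true
    · simp only [List.foldl_cons, ha, if_true, Bool.not_true, Bool.false_eq_true, if_false]
      rw [ih acc]
      have ha' : a ∈ pvQuatNames := by simpa using ha
      simp [ha']
    · simp only [List.foldl_cons, Bool.not_eq_true] at ha ⊢
      simp only [ha, Bool.false_eq_true, if_false]
      rw [ih (acc ++ [a])]
      have ha' : a ∉ pvQuatNames := by simpa using ha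
      simp [ha']

-- under the guard, A's start_idx is the length of the non-quat prefix
theorem pv_idx_q (pre suf : List String) (q : String)
    (hq : pvQuatNames.contains q = true)
    (hpre : ∀ n ∈ pre, pvQuatNames.contains n = false) :
    PySem.List.index? (pre ++ q :: suf) q = some pre.length := by
  rw [PySem.List.index?_eq_some_iff]
  refine ⟨pre, suf, rfl, rfl, fun hqin => ?_⟩
  rw [hpre q hqin] at hq; cases hq

theorem pv_idx_ge (names pre suf : List String) (q : String)
    (hsplit : names = pre ++ q :: suf)
    (hpre : ∀ n ∈ pre, pvQuatNames.contains n = false)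
    (n : String) (hn : pvQuatNames.contains n = true) (hmem : n ∈ names) :
    pre.length ≤ (PySem.List.index? names n).getD 0 := by
  obtain ⟨k, hk⟩ := Option.isSome_iff_exists.mp ((PySem.List.index?_isSome_iff names n).mpr hmem)
  obtain ⟨hklen, hkel, -⟩ := PySem.List.getElem_of_index?_eq_some hk
  rw [hk, Option.getD_some]
  by_contra hlt
  have hkp : k < pre.length := by omega
  have hel : names[k] = pre[k] := by
    subst hsplit; exact List.getElem_append_left hkp
  have : pvQuatNames.contains n = false := by
    rw [← hkel, hel]; exact hpre _ (List.getElem_mem _)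
  rw [this] at hn; cases hn

theorem pv_start_idx (names pre suf : List String) (q : String)
    (hsplit : names = pre ++ q :: suf) (hq : pvQuatNames.contains q = true)
    (hpre : ∀ n ∈ pre, pvQuatNames.contains n = false)
    (hall : ∀ n ∈ pvQuatNames, n ∈ names) :
    ((PySem.List.min? (pvQuatNames.map (fun n => ((PySem.List.index? names n).getD 0 : Int))) (fun x => x)).getD 0)
      = (pre.length : Int) := by
  have hqmem : q ∈ pvQuatNames := by simpa using hq
  have hge : ∀ n ∈ pvQuatNames, pre.length ≤ (PySem.List.index? names n).getD 0 := fun n hn =>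
    pv_idx_ge names pre suf q hsplit hpre n (by simpa using hn) (hall n hn)
  have hvq : (PySem.List.index? names q).getD 0 = pre.length := by
    rw [hsplit, pv_idx_q pre suf q hq hpre]; rfl
  have h0 := hge _ (show pvQuatNames[0] ∈ pvQuatNames by simp [pvQuatNames])
  have h1 := hge _ (show pvQuatNames[1] ∈ pvQuatNames by simp [pvQuatNames])
  have h2 := hge _ (show pvQuatNames[2] ∈ pvQuatNames by simp [pvQuatNames])
  have h3 := hge _ (show pvQuatNames[3] ∈ pvQuatNames by simp [pvQuatNames])
  simp only [pvQuatNames, List.getElem_cons_zero, List.getElem_cons_succ] at h0 h1 h2 h3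
  simp only [pvQuatNames, List.map_cons, List.map_nil, PySem.List.min?_id_cons,
    List.foldl_cons, List.foldl_nil, Option.getD_some]
  rcases (by simpa [pvQuatNames] using hqmem : q = "end_effector.orientation.x" ∨ q = "end_effector.orientation.y" ∨ q = "end_effector.orientation.z" ∨ q = "end_effector.orientation.w") with rfl | rfl | rfl | rfl <;> omega

-- ===== VERDICT (by name: the statement is the Claim_ definition above) =====
theorem replace_quat_names_py_spec : Claim_equal_replace_quat_names_py := by
  unfold Claim_equal_replace_quat_names_py Spec_replace_quat_names_py
  intro names _
  unfold replace_quat_names_py replace_quat_names_py_alt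
  by_cases hg : (pvQuatNames.all (fun name => names.contains name)) = true
  · have hall : ∀ n ∈ pvQuatNames, n ∈ names := by
      intro n hn
      have := (List.all_eq_true.mp hg) n hn
      simpa using this
    obtain ⟨pre, q, suf, hsplit, hq, hpre⟩ :=
      pv_exists_split names ⟨"end_effector.orientation.x",
        hall _ (by simp [pvQuatNames]), by decide⟩
    simp only [hg, Bool.not_true, Bool.false_eq_true, if_false]
    rw [pv_start_idx names pre suf q hsplit hq hpre hall]
    have hfilter : names.filter (fun n => !(pvQuatNames.contains n))
        = pre ++ List.filter (fun n => !(pvQuatNames.contains n)) suf := by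
      rw [hsplit, List.filter_append, List.filter_cons]
      simp only [hq, Bool.not_true, Bool.false_eq_true, if_false]
      rw [List.filter_eq_self.mpr (fun a ha => by rw [hpre a ha]; rfl)]
    rw [hfilter]
    have hA := pv_ins_block pre.length
      ((PySem.List.pyRange 0 6 1).map (fun i => "end_effector.rot6d" ++ "_" ++ PySem.Int.toStr i))
      pre (List.filter (fun n => !(pvQuatNames.contains n)) suf) 0 (by simp)
    rw [Nat.cast_zero] at hA
    rw [hA]
    -- B side
    rw [hsplit, List.foldl_append,
      pv_fold_nonquat pre [] false hpre, List.foldl_cons]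
    simp only [hq, if_true, Bool.not_false, List.nil_append]
    rw [pv_fold_done suf _]
  · simp only [Bool.not_eq_true] at hg
    rw [hg]
    simp
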